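-- pv_equiv track=rewrite | github.com/kkuchi/atCoder_training | Educational_DP/C/main.py | calc
-- ===== SOURCE A (Python) =====
-- def calc(n, a):
--     # 配列を作成
--     dp = [[] for i in range(n)]
--     # 最初の行はaと同じ
--     dp[0] = a[0]
--     # 1から繰り返し
--     for i in range(1, n):
--         # 3要素
--         for j in range(3):
--             # j以外のインデックスの最大値
--             previous = max(dp[i-1][:j]+dp[i-1][j+1:])
--             # a[i][j]足して決定
--             dp[i] += [previous+a[i][j]]
--
--     # 最終行の最大要素を返す
--     return max(dp[-1])
-- ===== SOURCE B (Python) =====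
-- def calc(n, a):
--     # Rolling previous row over the first n days: summarize the previous row once
--     # per day by its maximum, the index of that maximum and the maximum of the
--     # rest, instead of re-scanning a slice copy of it for each of the 3 activities.
--     rows = a[:max(n, 0)]
--     prev = rows[0]
--     for i in range(1, n):
--         best = max(prev)
--         bi = prev.index(best)
--         second = max(prev[:bi] + prev[bi + 1:])
--         day = rows[i]
--         prev = [(second if j == bi else best) + day[j] for j in range(3)]
--     return max(prev)
-- ===== Notes on version B (the rewrite author's own statement) =====
-- stated objective: alternative
-- what changed: Replaces the full dp table and the three per-activity max-scans over slice copies of the previous row by a single rolling row summarized once per day into (max, argmax, max-of-rest), from which each activity's best-other-activity value is selected in O(1).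
import Mathlib
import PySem

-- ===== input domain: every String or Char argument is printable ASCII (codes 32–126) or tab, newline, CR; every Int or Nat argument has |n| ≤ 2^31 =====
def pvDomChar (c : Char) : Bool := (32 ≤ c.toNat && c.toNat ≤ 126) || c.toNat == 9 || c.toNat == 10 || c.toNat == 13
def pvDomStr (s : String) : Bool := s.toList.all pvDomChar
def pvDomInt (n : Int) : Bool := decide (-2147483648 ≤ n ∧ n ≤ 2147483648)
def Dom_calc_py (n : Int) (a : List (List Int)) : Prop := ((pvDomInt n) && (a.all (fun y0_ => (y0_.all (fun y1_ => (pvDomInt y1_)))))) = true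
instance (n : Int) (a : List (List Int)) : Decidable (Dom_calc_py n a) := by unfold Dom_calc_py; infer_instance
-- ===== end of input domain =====

-- B keeps one rolling previous row summarized once per day into (max, argmax, max-of-rest),
-- instead of A's full dp table with three slice-copy max scans per day.

-- shared helpers: 'max(l)' with a default, and the slice expression 'l[:j] + l[j+1:]' that both Pythons write
def pvMaxD (l : List Int) : Int := (PySem.List.max? l (fun y => y)).getD 0
def pvExcl (l : List Int) (j : Int) : List Int :=
  PySem.List.slice l none (some j) ++ PySem.List.slice l (some (j + 1)) none

-- ===== PORT A =====
def calc_py (n : Int) (a : List (List Int)) : Int :=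
  -- dp = [[] for i in range(n)]
  let dp0 : List (List Int) := (PySem.List.pyRange 0 n 1).map (fun _ => ([] : List Int))
  -- dp[0] = a[0]   (index 0 is non-negative, so List.set is exact; the raising case, empty dp, is outside Pre_)
  let dp1 := dp0.set 0 ((PySem.List.pyGet? a 0).getD [])
  -- for i in range(1, n): for j in range(3): previous = max(dp[i-1][:j]+dp[i-1][j+1:]); dp[i] += [previous+a[i][j]]
  let dp2 := (PySem.List.pyRange 1 n 1).foldl (fun dp i =>
    (PySem.List.pyRange 0 3 1).foldl (fun dp j =>
      dp.set i.toNat (((PySem.List.pyGet? dp i).getD []) ++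
        [pvMaxD (pvExcl ((PySem.List.pyGet? dp (i - 1)).getD []) j) +
          (PySem.List.pyGet? ((PySem.List.pyGet? a i).getD []) j).getD 0])) dp) dp1
  -- return max(dp[-1])
  pvMaxD ((PySem.List.pyGet? dp2 (-1)).getD [])

-- ===== PORT B =====
def calc_py_alt (n : Int) (a : List (List Int)) : Int :=
  -- rows = a[:max(n, 0)]; prev = rows[0]
  let rows := PySem.List.slice a none (some (max n 0))
  -- per day: best = max(prev); bi = prev.index(best); second = max(prev[:bi]+prev[bi+1:]);
  -- prev = [(second if j == bi else best) + day[j] for j in range(3)]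
  let prev := (PySem.List.pyRange 1 n 1).foldl (fun prev i =>
    let best := pvMaxD prev
    let bi : Nat := (PySem.List.index? prev best).getD 0
    let second := pvMaxD (pvExcl prev (bi : Int))
    let day := (PySem.List.pyGet? rows i).getD []
    (PySem.List.pyRange 0 3 1).map (fun j =>
      (if j = (bi : Int) then second else best) + (PySem.List.pyGet? day j).getD 0))
    ((PySem.List.pyGet? rows 0).getD [])
  -- return max(prev)
  pvMaxD prev

-- ===== PRECONDITION & SPEC =====
-- exactly the inputs on which Python A returns: 1 ≤ n ≤ len(a); for n = 1 the first row is
-- nonempty (max over it); for n ≥ 2 the first row has ≥ 2 entries (so each excluded-index max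
-- is over a nonempty list) and rows 1..n-1 have ≥ 3 entries (a[i][j] for j < 3)
def Pre_calc_py (n : Int) (a : List (List Int)) : Prop :=
  1 ≤ n ∧ n ≤ (a.length : Int) ∧
  (n = 1 → a.headD [] ≠ []) ∧
  (2 ≤ n → 2 ≤ (a.headD []).length ∧ ∀ row ∈ (a.take n.toNat).drop 1, 3 ≤ row.length)
instance (n : Int) (a : List (List Int)) : Decidable (Pre_calc_py n a) := by
  unfold Pre_calc_py; infer_instance

def pvWitness_calc_py : Int × List (List Int) := (2, [[1, 2, 3], [4, 5, 6]])

def Spec_calc_py (n : Int) (a : List (List Int)) (out : Int) : Prop := out = calc_py_alt n a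
instance (n : Int) (a : List (List Int)) (out : Int) : Decidable (Spec_calc_py n a out) := by
  unfold Spec_calc_py; infer_instance

-- ===== CLAIM (what is proved, stated in full; the proofs are below) =====
def Claim_equal_calc_py : Prop := ∀ (n : Int) (a : List (List Int)),
  Dom_calc_py n a → Pre_calc_py n a → Spec_calc_py n a (calc_py n a)

-- ===== LEMMAS AND PROOFS =====

-- key lemma: for j ≥ 0 different from the first argmax index, the max of prev with
-- index j removed equals max prev
theorem pvExcl_max_ne (prev : List Int) (j : Int) (h0 : 0 ≤ j)
    (hne : j ≠ ((PySem.List.index? prev (pvMaxD prev)).getD 0 : Int)) :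
    pvMaxD (pvExcl prev j) = pvMaxD prev := by
  cases hb : PySem.List.max? prev (fun y => y) with
  | none =>
    have hp : prev = [] := (PySem.List.max?_eq_none_iff _ _).mp hb
    subst hp
    simp [pvMaxD, pvExcl, PySem.List.slice_to _ h0,
      PySem.List.slice_from _ (show (0:Int) ≤ j + 1 by omega)]
  | some b =>
    have hbmem : b ∈ prev := PySem.List.max?_mem hb
    have hmax : ∀ y ∈ prev, y ≤ b := PySem.List.max?_isMax hb
    have hbest : pvMaxD prev = b := by simp [pvMaxD, hb]
    obtain ⟨k, hk⟩ := Option.isSome_iff_exists.mp ((PySem.List.index?_isSome_iff _ _).mpr hbmem)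
    obtain ⟨hklen, hkb, -⟩ := PySem.List.getElem_of_index?_eq_some hk
    have hbi : (PySem.List.index? prev (pvMaxD prev)).getD 0 = k := by rw [hbest, hk]; rfl
    have hjj : (j.toNat : Int) = j := Int.toNat_of_nonneg h0
    have hL : pvExcl prev j = prev.take j.toNat ++ prev.drop (j.toNat + 1) := by
      unfold pvExcl
      rw [PySem.List.slice_to _ h0, PySem.List.slice_from _ (show (0:Int) ≤ j + 1 by omega)]
      have : (j + 1).toNat = j.toNat + 1 := by omega
      rw [this]
    have hkj : k ≠ j.toNat := by
      intro h
      exact hne (by rw [hbi, h, hjj])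
    have hbL : b ∈ prev.take j.toNat ++ prev.drop (j.toNat + 1) := by
      rcases lt_or_ge k j.toNat with h | h
      · exact List.mem_append_left _ (List.mem_iff_getElem.mpr
          ⟨k, by simp [h, hklen], by simpa [List.getElem_take] using hkb⟩)
      · have h' : j.toNat + 1 ≤ k := by omega
        refine List.mem_append_right _ (List.mem_iff_getElem.mpr
          ⟨k - (j.toNat + 1), by simp [List.length_drop]; omega, ?_⟩)
        rw [List.getElem_drop]
        have : j.toNat + 1 + (k - (j.toNat + 1)) = k := by omega
        simp only [this]; exact hkb
    cases hm : PySem.List.max? (prev.take j.toNat ++ prev.drop (j.toNat + 1)) (fun y => y) with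
    | none =>
      have := (PySem.List.max?_eq_none_iff _ _).mp hm
      rw [this] at hbL; simp at hbL
    | some m =>
      have hmmem := PySem.List.max?_mem hm
      have hmprev : m ∈ prev := by
        rcases List.mem_append.mp hmmem with h | h
        · exact List.mem_of_mem_take h
        · exact List.mem_of_mem_drop h
      have h1 : m ≤ b := hmax m hmprev
      have h2 : b ≤ m := PySem.List.max?_isMax hm b hbL
      rw [hL, hbest]
      simp [pvMaxD, hm]
      omega

-- the row both programs compute for day k
def stepRow (prev ai : List Int) : List Int :=
  (PySem.List.pyRange 0 3 1).foldl (fun acc j =>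
    acc ++ [pvMaxD (pvExcl prev j) + (PySem.List.pyGet? ai j).getD 0]) []

def pvRows (a : List (List Int)) : Nat → List Int
  | 0 => (PySem.List.pyGet? a 0).getD []
  | (k + 1) => stepRow (pvRows a k) ((PySem.List.pyGet? a ((k : Int) + 1)).getD [])

theorem set_append_length {α : Type} (l₁ l₂ : List α) (x : α) :
    (l₁ ++ l₂).set l₁.length x = l₁ ++ l₂.set 0 x := by
  induction l₁ with
  | nil => rfl
  | cons y ys ih => simp [ih]

-- A's inner loop over j appends the three entries of the new row into slot k of the dp list
theorem innerA (k : Nat) (hk : 1 ≤ k) (R : List (List Int)) (q : List Int)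
    (hlen : R.length = k) (hget : R[k-1]? = some q) (g : Int → Int) :
    ∀ (js : List Int) (p : List Int) (t : List (List Int)),
    js.foldl (fun dp j => dp.set ((k : Int)).toNat ((PySem.List.pyGet? dp (k : Int)).getD [] ++
        [pvMaxD (pvExcl ((PySem.List.pyGet? dp ((k : Int) - 1)).getD []) j) + g j])) (R ++ p :: t)
    = R ++ (js.foldl (fun acc j => acc ++ [pvMaxD (pvExcl q j) + g j]) p) :: t := by
  intro js
  induction js with
  | nil => intro p t; rfl
  | cons j js ih =>
    intro p t
    have e1 : PySem.List.pyGet? (R ++ p :: t) (k : Int) = some p := by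
      rw [PySem.List.pyGet?_natCast, List.getElem?_append_right (by omega)]
      simp [hlen]
    have e2 : PySem.List.pyGet? (R ++ p :: t) ((k : Int) - 1) = some q := by
      have hc : ((k : Int) - 1) = ((k - 1 : Nat) : Int) := by omega
      rw [hc, PySem.List.pyGet?_natCast, List.getElem?_append_left (by omega)]
      exact hget
    have e3 : ∀ x : List Int, (R ++ p :: t).set ((k : Int)).toNat x = R ++ x :: t := by
      intro x
      rw [show ((k : Int)).toNat = R.length from by omega, set_append_length]
      rfl
    simp only [List.foldl_cons, e1, e2, Option.getD_some, e3]
    exact ih _ t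

-- A's outer loop invariant: rows 0..k-1 are settled, rows k..m-1 still empty
theorem foldA (a : List (List Int)) (m : Nat) :
    ∀ k, 1 ≤ k → k ≤ m →
    (PySem.List.pyRange 1 (k : Int) 1).foldl (fun dp i =>
      (PySem.List.pyRange 0 3 1).foldl (fun dp j =>
        dp.set i.toNat (((PySem.List.pyGet? dp i).getD []) ++
          [pvMaxD (pvExcl ((PySem.List.pyGet? dp (i - 1)).getD []) j) +
            (PySem.List.pyGet? ((PySem.List.pyGet? a i).getD []) j).getD 0])) dp)
      (pvRows a 0 :: List.replicate (m - 1) [])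
    = (List.range k).map (pvRows a) ++ List.replicate (m - k) [] := by
  intro k hk
  induction k, hk using Nat.le_induction with
  | base =>
    intro _
    rw [show ((1:Nat):Int) = 1 from by norm_num, PySem.List.pyRange_one_eq_nil (le_refl 1)]
    simp [List.range_one]
  | succ k hk ih =>
    intro hkm
    have hcast : ((k + 1 : Nat) : Int) = (k : Int) + 1 := by push_cast; ring
    rw [hcast, PySem.List.pyRange_one_succ_right (by exact_mod_cast hk), List.foldl_append,
      ih (by omega)]
    have hrepl : List.replicate (m - k) ([] : List Int) = [] :: List.replicate (m - (k+1)) [] := by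
      rw [show m - k = (m - (k+1)) + 1 from by omega, List.replicate_succ]
    rw [hrepl]
    simp only [List.foldl_cons, List.foldl_nil]
    rw [innerA k hk _ (pvRows a (k-1)) (by simp)
      (by simp [show k - 1 < k from by omega]) _]
    have hrowk : (PySem.List.pyRange 0 3 1).foldl (fun acc j =>
        acc ++ [pvMaxD (pvExcl (pvRows a (k-1)) j) +
          (PySem.List.pyGet? ((PySem.List.pyGet? a (k : Int)).getD []) j).getD 0]) []
        = pvRows a k := by
      conv_rhs => rw [show k = (k - 1) + 1 from by omega]
      show _ = stepRow _ _
      unfold stepRow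
      rw [show (((k - 1 : Nat) : Int) + 1) = (k : Int) from by omega]
    rw [hrowk, List.range_succ, List.map_append]
    simp

-- B's per-day body computes the same row as A's inner loop
theorem stepB_eq (prev ai : List Int) :
    (PySem.List.pyRange 0 3 1).map (fun j =>
      (if j = (((PySem.List.index? prev (pvMaxD prev)).getD 0 : Nat) : Int)
        then pvMaxD (pvExcl prev (((PySem.List.index? prev (pvMaxD prev)).getD 0 : Nat) : Int))
        else pvMaxD prev) + (PySem.List.pyGet? ai j).getD 0)
    = stepRow prev ai := by
  unfold stepRow
  rw [PySem.List.foldl_append_singleton_eq_map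
    (fun j => pvMaxD (pvExcl prev j) + (PySem.List.pyGet? ai j).getD 0), List.nil_append]
  apply List.map_congr_left
  intro j hj
  have h0 : 0 ≤ j := (PySem.List.mem_pyRange_one.mp hj).1
  by_cases hbi : j = (((PySem.List.index? prev (pvMaxD prev)).getD 0 : Nat) : Int)
  · rw [if_pos hbi, hbi]
  · rw [if_neg hbi, pvExcl_max_ne prev j h0 hbi]

-- B's rolling row equals row k-1 after the loop over range(1, k)
theorem foldB (a : List (List Int)) :
    ∀ k : Nat, 1 ≤ k →
    (PySem.List.pyRange 1 (k : Int) 1).foldl (fun prev i =>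
      (PySem.List.pyRange 0 3 1).map (fun j =>
        (if j = (((PySem.List.index? prev (pvMaxD prev)).getD 0 : Nat) : Int)
          then pvMaxD (pvExcl prev (((PySem.List.index? prev (pvMaxD prev)).getD 0 : Nat) : Int))
          else pvMaxD prev) + (PySem.List.pyGet? ((PySem.List.pyGet? a i).getD []) j).getD 0))
      (pvRows a 0)
    = pvRows a (k - 1) := by
  intro k hk
  induction k, hk using Nat.le_induction with
  | base =>
    rw [show ((1:Nat):Int) = 1 from by norm_num, PySem.List.pyRange_one_eq_nil (le_refl 1)]
    rfl
  | succ k hk ih =>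
    have hcast : ((k + 1 : Nat) : Int) = (k : Int) + 1 := by push_cast; ring
    rw [hcast, PySem.List.pyRange_one_succ_right (by exact_mod_cast hk), List.foldl_append, ih]
    simp only [List.foldl_cons, List.foldl_nil]
    rw [stepB_eq]
    conv_rhs => rw [show (k + 1 - 1 : Nat) = (k - 1) + 1 from by omega, pvRows]
    show stepRow _ _ = _
    rw [show (((k - 1 : Nat) : Int) + 1) = (k : Int) from by omega]

theorem lastRow (f : Nat → List Int) (m : Nat) (hm : 1 ≤ m) :
    ((List.range m).map f).getLast? = some (f (m - 1)) := by
  rw [List.getLast?_eq_getElem?]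
  simp [show m - 1 < m from by omega]

-- the first k ≤ m - 1 rows only read a[0..m-1], so truncating a to m rows changes nothing
theorem pvRows_take (a : List (List Int)) (m : Nat) (hm : 1 ≤ m) :
    ∀ k, k ≤ m - 1 → pvRows (a.take m) k = pvRows a k := by
  intro k
  induction k with
  | zero =>
    intro _
    show ((PySem.List.pyGet? (a.take m) 0).getD []) = (PySem.List.pyGet? a 0).getD []
    rw [show ((0:Int)) = ((0:Nat):Int) from rfl, PySem.List.pyGet?_natCast,
      PySem.List.pyGet?_natCast, List.getElem?_take, if_pos (show 0 < m from by omega)]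
  | succ k ih =>
    intro hk
    show stepRow _ _ = stepRow _ _
    rw [ih (by omega)]
    congr 1
    rw [show ((k:Int) + 1) = ((k + 1 : Nat) : Int) from by push_cast; ring,
      PySem.List.pyGet?_natCast, PySem.List.pyGet?_natCast, List.getElem?_take]
    simp [show k + 1 < m from by omega]

theorem main_thm (n : Int) (a : List (List Int)) (h1 : 1 ≤ n) :
    calc_py n a = calc_py_alt n a := by
  set m := n.toNat with hmdef
  have hm1 : 1 ≤ m := by omega
  have hn : n = (m : Int) := by omega
  have hdp0 : (PySem.List.pyRange 0 (m : Int) 1).map (fun _ => ([] : List Int))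
      = [] :: List.replicate (m - 1) [] := by
    have : (PySem.List.pyRange 0 (m : Int) 1).map (fun _ => ([] : List Int))
        = List.replicate m [] := by
      refine List.eq_replicate_iff.mpr ⟨?_, by simp⟩
      simp [PySem.List.length_pyRange_one]
    rw [this]
    conv_lhs => rw [show m = (m - 1) + 1 from by omega, List.replicate_succ]
  have hA : calc_py n a = pvMaxD (pvRows a (m - 1)) := by
    simp only [calc_py, hn]
    rw [hdp0]
    show pvMaxD ((PySem.List.pyGet? (List.foldl _
      ((([] : List Int) :: List.replicate (m-1) []).set 0 (pvRows a 0)) _) (-1)).getD []) = _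
    rw [show ((([] : List Int) :: List.replicate (m-1) []).set 0 (pvRows a 0))
      = pvRows a 0 :: List.replicate (m-1) [] from rfl]
    rw [foldA a m m hm1 (le_refl m)]
    rw [show m - m = 0 from by omega]
    simp only [List.replicate_zero, List.append_nil]
    rw [PySem.List.pyGet?_neg_one, lastRow (pvRows a) m hm1]
    rfl
  have hB : calc_py_alt n a = pvMaxD (pvRows a (m - 1)) := by
    simp only [calc_py_alt, hn]
    rw [show (max ((m : Nat) : Int) 0) = ((m : Nat) : Int) from by omega,
      PySem.List.slice_to _ (by omega), show ((m : Nat) : Int).toNat = m from by omega]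
    rw [show ((PySem.List.pyGet? (a.take m) 0).getD [] : List Int)
      = pvRows (a.take m) 0 from rfl]
    rw [foldB (a.take m) m hm1, pvRows_take a m hm1 (m - 1) (by omega)]
  rw [hA, hB]

-- ===== VERDICT (by name: the statement is the Claim_ definition above) =====
theorem calc_py_spec : Claim_equal_calc_py := by
  intro n a _ hpre
  unfold Spec_calc_py
  exact main_thm n a hpre.1
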